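-- pv_equiv track=rewrite | github.com/deanmauriceellis-cloud/LocationMapApp | tools/witch-trials-generator/salem_corpus_loader.py | _facts_in_range
-- ===== SOURCE A (Python) =====
-- FACTS_PER_ARTICLE_CAP = 25
--
-- def _facts_in_range(facts, start_iso, end_iso, cap=FACTS_PER_ARTICLE_CAP):
--     """Date-bucket facts whose `date` falls in [start_iso, end_iso] inclusive."""
--     matching = []
--     for f in facts:
--         if not isinstance(f, dict):
--             continue
--         d = f.get("date") or ""
--         if d and start_iso <= d <= end_iso:
--             matching.append(f)
--
--     def sort_key(f):
--         cat = f.get("category", "")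
--         priority = 0 if cat in ("biographical", "key_event", "trial_event") else 1
--         return (priority, f.get("date", ""), f.get("id", ""))
--     matching.sort(key=sort_key)
--     return matching[:cap]
-- ===== SOURCE B (Python) =====
-- FACTS_PER_ARTICLE_CAP = 25
--
-- _FAVORED = ("biographical", "key_event", "trial_event")
--
--
-- def _facts_in_range(facts, start_iso, end_iso, cap=FACTS_PER_ARTICLE_CAP):
--     """Bucket decomposition: partition matching facts by category priority,
--     sort each bucket by (date, id), favored bucket first, then cap."""
--     favored, other = [], []
--     for f in facts:
--         if not isinstance(f, dict):
--             continue
--         d = f.get("date") or ""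
--         if d and start_iso <= d <= end_iso:
--             (favored if f.get("category", "") in _FAVORED else other).append(f)
--
--     def pair_key(f):
--         return (f.get("date", ""), f.get("id", ""))
--
--     favored.sort(key=pair_key)
--     other.sort(key=pair_key)
--     return (favored + other)[:cap]
-- ===== Notes on version B (the rewrite author's own statement) =====
-- stated objective: alternative
-- what changed: B replaces A's single stable sort under a 3-tuple (priority, date, id) key by a partition of the matching facts into the favored-category bucket and the rest during the filter loop, sorting each bucket by (date, id) and concatenating favored-first before applying the cap.
import Mathlib
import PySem

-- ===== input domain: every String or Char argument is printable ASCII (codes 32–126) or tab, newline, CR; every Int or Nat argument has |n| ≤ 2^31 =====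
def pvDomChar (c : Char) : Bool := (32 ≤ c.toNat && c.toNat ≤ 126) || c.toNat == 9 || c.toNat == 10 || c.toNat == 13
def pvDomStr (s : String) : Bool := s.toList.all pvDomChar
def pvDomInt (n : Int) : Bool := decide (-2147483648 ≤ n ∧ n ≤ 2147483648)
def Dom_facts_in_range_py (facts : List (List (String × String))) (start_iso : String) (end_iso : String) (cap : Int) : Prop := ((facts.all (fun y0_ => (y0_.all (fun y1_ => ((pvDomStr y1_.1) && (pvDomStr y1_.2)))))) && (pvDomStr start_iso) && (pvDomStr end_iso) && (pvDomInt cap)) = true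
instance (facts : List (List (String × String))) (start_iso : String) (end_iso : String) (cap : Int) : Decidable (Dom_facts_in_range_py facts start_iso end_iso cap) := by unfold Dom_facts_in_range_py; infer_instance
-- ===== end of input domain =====

-- B replaces A's single stable sort under a 3-tuple key by a partition into the favored-category
-- bucket and the rest, each bucket sorted by (date, id), concatenated favored-first, then capped
-- (objective: alternative decomposition; same asymptotic cost).

-- shared accessors: both Pythons contain the same `f.get(...)` expressions
-- f.get(k, "") : first-match association-list lookup with default ""
def pvGetD (f : List (String × String)) (k : String) : String := (List.lookup k f).getD ""
-- f.get("date") or "" : `or ""` maps both a missing key (None) and an empty value to "", i.e. getD ""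
def pvDate (f : List (String × String)) : String := pvGetD f "date"
def pvId (f : List (String × String)) : String := pvGetD f "id"
-- f.get("category", "") in ("biographical", "key_event", "trial_event")
def pvFavored (f : List (String × String)) : Bool :=
  pvGetD f "category" ∈ (["biographical", "key_event", "trial_event"] : List String)
-- the filter condition: d and start_iso <= d <= end_iso
def pvCond (start_iso end_iso : String) (f : List (String × String)) : Bool :=
  pvDate f != "" && decide (start_iso ≤ pvDate f) && decide (pvDate f ≤ end_iso)

-- ===== PORT A =====
-- priority = 0 if cat in (...) else 1
def pvPriority (f : List (String × String)) : Int := if pvFavored f then 0 else 1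
-- sort_key(f) = (priority, f.get("date",""), f.get("id","")) — Python tuple comparison is
-- lexicographic, ported exactly as the lexicographic product order Int ×ₗ (String ×ₗ String)
def pvKey (f : List (String × String)) : Int ×ₗ (String ×ₗ String) :=
  toLex (pvPriority f, toLex (pvDate f, pvId f))
-- the `isinstance(f, dict)` guard is always true under the type convention (every f IS a dict)
def facts_in_range_py (facts : List (List (String × String))) (start_iso : String) (end_iso : String) (cap : Int) : List (List (String × String)) :=
  let matching := facts.foldl (fun acc f => if pvCond start_iso end_iso f then acc ++ [f] else acc) []
  PySem.List.slice (PySem.List.sorted matching pvKey) none (some cap)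

-- ===== PORT B =====
-- one loop appending each matching fact to its bucket, then each bucket sorted by (date, id)
def facts_in_range_py_alt (facts : List (List (String × String))) (start_iso : String) (end_iso : String) (cap : Int) : List (List (String × String)) :=
  let p := facts.foldl
    (fun (acc : List (List (String × String)) × List (List (String × String))) f =>
      if pvCond start_iso end_iso f then
        if pvFavored f then (acc.1 ++ [f], acc.2) else (acc.1, acc.2 ++ [f])
      else acc)
    ([], [])
  PySem.List.slice (PySem.List.sorted2 p.1 pvDate pvId ++ PySem.List.sorted2 p.2 pvDate pvId) none (some cap)

-- ===== PRECONDITION & SPEC =====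
def Spec_facts_in_range_py (facts : List (List (String × String))) (start_iso : String) (end_iso : String) (cap : Int) (out : List (List (String × String))) : Prop := out = facts_in_range_py_alt facts start_iso end_iso cap
instance (facts : List (List (String × String))) (start_iso : String) (end_iso : String) (cap : Int) (out : List (List (String × String))) : Decidable (Spec_facts_in_range_py facts start_iso end_iso cap out) := by unfold Spec_facts_in_range_py; infer_instance

-- ===== CLAIM (what is proved, stated in full; the proofs are below) =====
def Claim_equal_facts_in_range_py : Prop := ∀ (facts : List (List (String × String))) (start_iso : String) (end_iso : String) (cap : Int), Dom_facts_in_range_py facts start_iso end_iso cap → Spec_facts_in_range_py facts start_iso end_iso cap (facts_in_range_py facts start_iso end_iso cap)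

-- ===== LEMMAS AND PROOFS =====

-- A's insertion comparator (what PySem.List.sorted uses under pvKey)
def before3 (x y : List (String × String)) : Bool := decide (pvKey x < pvKey y)
-- B's bucket comparator (what PySem.List.sorted2 uses under (pvDate, pvId))
def before2 (x y : List (String × String)) : Bool :=
  decide (pvDate x < pvDate y) || !decide (pvDate y < pvDate x) && decide (pvId x < pvId y)

theorem insertBy_congr {α : Type} (b1 b2 : α → α → Bool) (x : α) (ys : List α)
    (h : ∀ y ∈ ys, b1 x y = b2 x y) :
    PySem.List.insertBy b1 x ys = PySem.List.insertBy b2 x ys := by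
  induction ys with
  | nil => rfl
  | cons y t ih =>
    simp only [PySem.List.insertBy]
    rw [h y (List.mem_cons_self)]
    by_cases hb : b2 x y = true
    · simp [hb]
    · simp only [Bool.not_eq_true] at hb
      simp [hb, ih (fun z hz => h z (List.mem_cons_of_mem _ hz))]

theorem insertBy_append_left {α : Type} (before : α → α → Bool) (x : α) (ys zs : List α)
    (h : ∀ z ∈ zs, before x z = true) :
    PySem.List.insertBy before x (ys ++ zs) = PySem.List.insertBy before x ys ++ zs := by
  induction ys with
  | nil =>
    cases zs with
    | nil => rfl
    | cons z t => simp [PySem.List.insertBy, h z List.mem_cons_self]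
  | cons y t ih =>
    simp only [List.cons_append, PySem.List.insertBy]
    by_cases hb : before x y = true
    · simp [hb]
    · simp only [Bool.not_eq_true] at hb
      simp [hb, ih]

theorem insertBy_append_right {α : Type} (before : α → α → Bool) (x : α) (ys zs : List α)
    (h : ∀ y ∈ ys, before x y = false) :
    PySem.List.insertBy before x (ys ++ zs) = ys ++ PySem.List.insertBy before x zs := by
  induction ys with
  | nil => rfl
  | cons y t ih =>
    simp only [List.cons_append, PySem.List.insertBy, h y List.mem_cons_self]
    simp [ih (fun z hz => h z (List.mem_cons_of_mem _ hz))]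

theorem before3_eq_before2 (x y : List (String × String)) (h : pvFavored x = pvFavored y) :
    before3 x y = before2 x y := by
  have hp : pvPriority x = pvPriority y := by simp [pvPriority, h]
  simp only [before3, before2, pvKey]
  rcases lt_trichotomy (pvDate x) (pvDate y) with hd | hd | hd
  · simp [Prod.Lex.lt_iff, hp, hd, not_lt_of_gt hd]
  · simp [Prod.Lex.lt_iff, hp, hd]
  · simp [Prod.Lex.lt_iff, hp, not_lt_of_gt hd, ne_of_gt hd]
    intro hle
    exact absurd hle (by simpa using not_le_of_gt hd)

theorem before3_fav_other (x z : List (String × String))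
    (hx : pvFavored x = true) (hz : pvFavored z = false) : before3 x z = true := by
  simp [before3, pvKey, Prod.Lex.lt_iff, pvPriority, hx, hz]

theorem before3_other_fav (x y : List (String × String))
    (hx : pvFavored x = false) (hy : pvFavored y = true) : before3 x y = false := by
  simp [before3, pvKey, Prod.Lex.lt_iff, pvPriority, hx, hy]

-- the bucket decomposition of a stable insertion sort under the lexicographic key:
-- inserting into accF ++ accO lands in accF for favored elements and in accO otherwise
theorem foldl_insert_split (xs : List (List (String × String)))
    (accF accO : List (List (String × String)))
    (hF : ∀ f ∈ accF, pvFavored f = true) (hO : ∀ f ∈ accO, pvFavored f = false) :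
    xs.foldl (fun acc x => PySem.List.insertBy before3 x acc) (accF ++ accO)
      = (xs.filter pvFavored).foldl (fun acc x => PySem.List.insertBy before2 x acc) accF
        ++ (xs.filter (fun f => !pvFavored f)).foldl (fun acc x => PySem.List.insertBy before2 x acc) accO := by
  induction xs generalizing accF accO with
  | nil => simp
  | cons x t ih =>
    simp only [List.foldl_cons, List.filter_cons]
    by_cases hx : pvFavored x = true
    · have h1 : PySem.List.insertBy before3 x (accF ++ accO)
          = PySem.List.insertBy before3 x accF ++ accO :=
        insertBy_append_left _ _ _ _ (fun z hz => before3_fav_other x z hx (hO z hz))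
      have h2 : PySem.List.insertBy before3 x accF = PySem.List.insertBy before2 x accF :=
        insertBy_congr _ _ _ _ (fun y hy => before3_eq_before2 x y (hx.trans (hF y hy).symm))
      rw [h1, h2, ih (PySem.List.insertBy before2 x accF) accO
        (fun y hy => by
          rcases (PySem.List.mem_insertBy before2 x y accF).1 hy with rfl | hy
          · exact hx
          · exact hF y hy) hO]
      simp [hx]
    · simp only [Bool.not_eq_true] at hx
      have h1 : PySem.List.insertBy before3 x (accF ++ accO)
          = accF ++ PySem.List.insertBy before3 x accO :=
        insertBy_append_right _ _ _ _ (fun y hy => before3_other_fav x y hx (hF y hy))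
      have h2 : PySem.List.insertBy before3 x accO = PySem.List.insertBy before2 x accO :=
        insertBy_congr _ _ _ _ (fun y hy => before3_eq_before2 x y (hx.trans (hO y hy).symm))
      rw [h1, h2, ih accF (PySem.List.insertBy before2 x accO) hF
        (fun y hy => by
          rcases (PySem.List.mem_insertBy before2 x y accO).1 hy with rfl | hy
          · exact hx
          · exact hO y hy)]
      simp [hx]

-- B's single bucketing loop builds exactly the two filters of the matching list
theorem foldl_pair_split (start_iso end_iso : String) (xs : List (List (String × String)))
    (accF accO : List (List (String × String))) :
    xs.foldl
      (fun (acc : List (List (String × String)) × List (List (String × String))) f =>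
        if pvCond start_iso end_iso f then
          if pvFavored f then (acc.1 ++ [f], acc.2) else (acc.1, acc.2 ++ [f])
        else acc)
      (accF, accO)
      = (accF ++ ((xs.filter (pvCond start_iso end_iso)).filter pvFavored),
         accO ++ ((xs.filter (pvCond start_iso end_iso)).filter (fun f => !pvFavored f))) := by
  induction xs generalizing accF accO with
  | nil => simp
  | cons x t ih =>
    simp only [List.foldl_cons, List.filter_cons]
    by_cases hc : pvCond start_iso end_iso x = true
    · by_cases hx : pvFavored x = true
      · simp [hc, hx, ih]
      · simp only [Bool.not_eq_true] at hx
        simp [hc, hx, ih]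
    · simp only [Bool.not_eq_true] at hc
      simp [hc, ih]

theorem facts_in_range_py_eq_alt (facts : List (List (String × String)))
    (start_iso end_iso : String) (cap : Int) :
    facts_in_range_py facts start_iso end_iso cap
      = facts_in_range_py_alt facts start_iso end_iso cap := by
  unfold facts_in_range_py facts_in_range_py_alt
  rw [show (facts.foldl (fun acc f => if pvCond start_iso end_iso f then acc ++ [f] else acc) [])
      = [] ++ (facts.filter (pvCond start_iso end_iso)).map id from
      PySem.List.foldl_append_if (pvCond start_iso end_iso) id facts []]
  rw [foldl_pair_split start_iso end_iso facts [] []]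
  simp only [List.nil_append, List.map_id]
  rw [PySem.List.sorted_eq_foldl_insertBy]
  have := foldl_insert_split (facts.filter (pvCond start_iso end_iso)) [] []
    (by simp) (by simp)
  simp only [List.nil_append] at this
  rw [show (fun acc x => PySem.List.insertBy (fun a b => decide (pvKey a < pvKey b)) x acc)
      = (fun acc x => PySem.List.insertBy before3 x acc) from rfl, this]
  rfl

-- ===== VERDICT (by name: the statement is the Claim_ definition above) =====
theorem facts_in_range_py_spec : Claim_equal_facts_in_range_py := by
  intro facts start_iso end_iso cap _
  unfold Spec_facts_in_range_py
  exact facts_in_range_py_eq_alt facts start_iso end_iso cap
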